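-- pv_equiv track=rewrite | github.com/vivekvajipey/road-speeds | util.py | get_tabular_dim
-- ===== SOURCE A (Python) =====
-- def get_tabular_dim(cols: list[str]):
--     dim = 0
--     for col in cols:
--         if col == 'year':
--             dim += 3
--         if col == 'month':
--             dim += 11
--         elif col == 'hour_ratios':
--             dim += 24
--         else:
--             dim += 1
--     return dim
-- ===== SOURCE B (Python) =====
-- def get_tabular_dim(cols: list[str]):
--     return (len(cols)
--             + 3 * cols.count('year')
--             + 10 * cols.count('month')
--             + 23 * cols.count('hour_ratios'))
-- ===== Notes on version B (the rewrite author's own statement) =====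
-- stated objective: simpler
-- what changed: Replaced the element-wise branching loop with a closed-form aggregate: len(cols) plus weighted counts of the three special column names (year +3, month +10, hour_ratios +23 over the base 1).
import Mathlib
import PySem

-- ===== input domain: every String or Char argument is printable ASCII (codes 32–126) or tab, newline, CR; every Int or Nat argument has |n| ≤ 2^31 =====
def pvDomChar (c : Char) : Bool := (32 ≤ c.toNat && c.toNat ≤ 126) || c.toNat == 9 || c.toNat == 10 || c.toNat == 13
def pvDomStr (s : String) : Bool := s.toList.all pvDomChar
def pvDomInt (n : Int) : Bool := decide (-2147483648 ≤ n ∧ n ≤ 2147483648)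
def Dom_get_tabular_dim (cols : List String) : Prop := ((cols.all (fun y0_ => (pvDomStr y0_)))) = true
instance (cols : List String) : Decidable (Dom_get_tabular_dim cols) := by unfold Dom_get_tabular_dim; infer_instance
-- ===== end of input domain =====

-- B replaces A's per-element branching loop by a closed form: length plus weighted counts
-- of the three special column names (simpler decomposition; same return value).

-- ===== PORT A =====
def get_tabular_dim (cols : List String) : Int :=
  cols.foldl (fun dim col =>
    let dim := if col == "year" then dim + 3 else dim
    if col == "month" then dim + 11
    else if col == "hour_ratios" then dim + 24
    else dim + 1) 0

-- ===== PORT B =====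
def get_tabular_dim_alt (cols : List String) : Int :=
  (cols.length : Int)
    + 3 * (cols.count "year" : Int)
    + 10 * (cols.count "month" : Int)
    + 23 * (cols.count "hour_ratios" : Int)

-- ===== PRECONDITION & SPEC =====
def Spec_get_tabular_dim (cols : List String) (out : Int) : Prop := out = get_tabular_dim_alt cols
instance (cols : List String) (out : Int) : Decidable (Spec_get_tabular_dim cols out) := by unfold Spec_get_tabular_dim; infer_instance

-- ===== CLAIM (what is proved, stated in full; the proofs are below) =====
def Claim_equal_get_tabular_dim : Prop := ∀ (cols : List String), Dom_get_tabular_dim cols → Spec_get_tabular_dim cols (get_tabular_dim cols)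

-- ===== LEMMAS AND PROOFS =====

theorem foldl_shift (cols : List String) (a : Int) :
    cols.foldl (fun dim col =>
      let dim := if col == "year" then dim + 3 else dim
      if col == "month" then dim + 11
      else if col == "hour_ratios" then dim + 24
      else dim + 1) a
    = a + (cols.length : Int)
        + 3 * (cols.count "year" : Int)
        + 10 * (cols.count "month" : Int)
        + 23 * (cols.count "hour_ratios" : Int) := by
  induction cols generalizing a with
  | nil => simp
  | cons c cs ih =>
    simp only [List.foldl_cons, ih, List.length_cons, List.count_cons]
    by_cases h1 : c = "year" <;> by_cases h2 : c = "month" <;>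
      by_cases h3 : c = "hour_ratios" <;>
      simp_all [beq_iff_eq] <;> ring

theorem get_tabular_dim_eq (cols : List String) :
    get_tabular_dim cols = get_tabular_dim_alt cols := by
  have h := foldl_shift cols 0
  simpa [get_tabular_dim, get_tabular_dim_alt] using h

-- ===== VERDICT (by name: the statement is the Claim_ definition above) =====
theorem get_tabular_dim_spec : Claim_equal_get_tabular_dim := by
  intro cols _
  exact get_tabular_dim_eq cols
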